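-- pv_equiv track=rewrite | github.com/kaluginpeter/Algorithms_and_structures_tasks | CodeWars/5kyu/Mirrored_Exponential_Chunks.py | mirrored_exponential_chunks
-- ===== SOURCE A (Python) =====
-- def mirrored_exponential_chunks(arr):
--     n = len(arr)
--     res = []
--     if n % 2 == 1:
--         mid = n // 2
--         res = [[arr[mid]]]
--         left = mid
--         right = mid + 1
--         step = 1
--     else:
--         left = n // 2
--         right = left
--         res = []
--         step = 1
--     chunks = []
--     while left > 0 or right < n:
--         size = 2 ** step
--         l_start = max(0, left - size)
--         left_chunk = arr[l_start:left]
--         r_end = min(n, right + size)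
--         right_chunk = arr[right:r_end]
--         if left_chunk: chunks.insert(0, left_chunk)
--         if right_chunk: chunks.append(right_chunk)
--         left = l_start
--         right = r_end
--         step += 1
--     return chunks[:len(chunks)//2] + res + chunks[len(chunks)//2:]
-- ===== SOURCE B (Python) =====
-- def mirrored_exponential_chunks(arr):
--     n = len(arr)
--     half = n // 2
--     sizes = []
--     rem = half
--     step = 1
--     while rem > 0:
--         s = min(2 ** step, rem)
--         sizes.append(s)
--         rem -= s
--         step += 1
--     full = sizes[::-1] + ([1] if n % 2 == 1 else []) + sizes
--     out = []
--     i = 0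
--     for s in full:
--         out.append(arr[i:i + s])
--         i += s
--     return out
-- ===== Notes on version B (the rewrite author's own statement) =====
-- stated objective: simpler
-- what changed: Replaces A's bidirectional expanding loop with insert(0)/append and the final chunks[:half]+res+chunks[half:] reassembly by first computing the clamped doubling size table of one half, mirroring it around the optional odd-center singleton, and slicing the array in one forward pass.
import Mathlib
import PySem

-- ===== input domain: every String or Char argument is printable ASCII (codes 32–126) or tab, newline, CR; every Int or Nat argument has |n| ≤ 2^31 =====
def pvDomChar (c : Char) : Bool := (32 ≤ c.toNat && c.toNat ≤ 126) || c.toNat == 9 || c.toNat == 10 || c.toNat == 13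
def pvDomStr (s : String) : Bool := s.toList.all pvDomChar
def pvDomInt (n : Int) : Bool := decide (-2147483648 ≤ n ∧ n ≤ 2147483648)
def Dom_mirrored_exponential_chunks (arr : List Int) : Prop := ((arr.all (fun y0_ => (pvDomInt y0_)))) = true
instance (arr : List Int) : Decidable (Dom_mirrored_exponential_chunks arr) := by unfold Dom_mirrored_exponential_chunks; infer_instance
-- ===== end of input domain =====

-- B rewrites A's bidirectional expanding loop as one size-table pass plus a single
-- forward slicing pass (objective: simpler; no speed claim).

-- ===== PORT A =====
-- the while-loop of A: state (left, right, step, chunks); insert(0) prepends, append appends.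
-- The fuel argument is only a structural-termination guard: each pass moves left/right by at
-- least one element, so fuel = len(arr) + 1 is never exhausted.
def mecLoop : Nat → List Int → Int → Int → Int → Nat → List (List Int) → List (List Int)
  | 0, _, _, _, _, _, chunks => chunks
  | fuel + 1, arr, n, left, right, step, chunks =>
    if 0 < left ∨ right < n then
      let size : Int := 2 ^ step
      let l_start := max 0 (left - size)
      let left_chunk := PySem.List.slice arr (some l_start) (some left)
      let r_end := min n (right + size)
      let right_chunk := PySem.List.slice arr (some right) (some r_end)
      let chunks1 := if left_chunk ≠ [] then left_chunk :: chunks else chunks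
      let chunks2 := if right_chunk ≠ [] then chunks1 ++ [right_chunk] else chunks1
      mecLoop fuel arr n l_start r_end (step + 1) chunks2
    else chunks

def mirrored_exponential_chunks (arr : List Int) : List (List Int) :=
  let n : Int := arr.length
  if PySem.Int.mod n 2 = 1 then
    let mid := PySem.Int.floordiv n 2
    -- arr[mid]: always in range here (n odd ⇒ 0 ≤ mid < n), so the getD default never fires
    let res := [[(PySem.List.pyGet? arr mid).getD 0]]
    let chunks := mecLoop (arr.length + 1) arr n mid (mid + 1) 1 []
    chunks.take (chunks.length / 2) ++ res ++ chunks.drop (chunks.length / 2)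
  else
    let left := PySem.Int.floordiv n 2
    let chunks := mecLoop (arr.length + 1) arr n left left 1 []
    chunks.take (chunks.length / 2) ++ [] ++ chunks.drop (chunks.length / 2)

-- ===== PORT B =====
-- size table: chunk sizes of one half, expanding outwards (2, 4, 8, … clamped by what is left).
-- The fuel argument is only a structural-termination guard: rem shrinks every pass, so
-- fuel = rem suffices.
def mecSizes : Nat → Nat → Nat → List Nat
  | 0, _, _ => []
  | fuel + 1, rem, step =>
    if rem > 0 then
      min (2 ^ step) rem :: mecSizes fuel (rem - min (2 ^ step) rem) (step + 1)
    else []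

-- the single forward pass: out.append(arr[i:i+s]) for each size s
def mecCut (arr : List Int) (i : Nat) (sizes : List Nat) : List (List Int) :=
  match sizes with
  | [] => []
  | s :: rest =>
      PySem.List.slice arr (some (i : Int)) (some ((i : Int) + (s : Int))) :: mecCut arr (i + s) rest

def mirrored_exponential_chunks_alt (arr : List Int) : List (List Int) :=
  let n := arr.length
  let sizes := mecSizes (n / 2) (n / 2) 1
  let full := sizes.reverse ++ (if n % 2 = 1 then [1] else []) ++ sizes
  mecCut arr 0 full

-- ===== PRECONDITION & SPEC =====
def Spec_mirrored_exponential_chunks (arr : List Int) (out : List (List Int)) : Prop := out = mirrored_exponential_chunks_alt arr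
instance (arr : List Int) (out : List (List Int)) : Decidable (Spec_mirrored_exponential_chunks arr out) := by unfold Spec_mirrored_exponential_chunks; infer_instance

-- ===== CLAIM (what is proved, stated in full; the proofs are below) =====
def Claim_equal_mirrored_exponential_chunks : Prop := ∀ (arr : List Int), Dom_mirrored_exponential_chunks arr → Spec_mirrored_exponential_chunks arr (mirrored_exponential_chunks arr)

-- ===== LEMMAS AND PROOFS =====

-- A's left chunks in array order, as produced by repeated insert(0)
def cutRev (arr : List Int) (L : Nat) (sizes : List Nat) : List (List Int) :=
  match sizes with
  | [] => []
  | s :: rest => cutRev arr (L - s) rest ++ [(arr.drop (L - s)).take s]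

theorem cutRev_nil (arr : List Int) (L : Nat) : cutRev arr L [] = [] := rfl

theorem cutRev_cons (arr : List Int) (L s : Nat) (rest : List Nat) :
    cutRev arr L (s :: rest) = cutRev arr (L - s) rest ++ [(arr.drop (L - s)).take s] := rfl

theorem mecCut_nil (arr : List Int) (i : Nat) : mecCut arr i [] = [] := rfl

theorem mecCut_cons (arr : List Int) (i s : Nat) (rest : List Nat) :
    mecCut arr i (s :: rest) = (arr.drop i).take s :: mecCut arr (i + s) rest := by
  have h : ((i : Int) + (s : Int)) = ((i + s : Nat) : Int) := by push_cast; ring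
  rw [mecCut, h, PySem.List.slice_natCast]
  congr 2
  omega

theorem mecCut_append (arr : List Int) (xs ys : List Nat) :
    ∀ i, mecCut arr i (xs ++ ys) = mecCut arr i xs ++ mecCut arr (i + xs.sum) ys := by
  induction xs with
  | nil => intro i; simp [mecCut_nil]
  | cons s rest ih =>
      intro i
      rw [List.cons_append, mecCut_cons, ih (i + s), mecCut_cons, List.cons_append,
        List.sum_cons, show i + s + rest.sum = i + (s + rest.sum) by omega]

theorem mecCut_length (arr : List Int) : ∀ sizes i, (mecCut arr i sizes).length = sizes.length := by
  intro sizes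
  induction sizes with
  | nil => intro i; simp [mecCut_nil]
  | cons s rest ih => intro i; simp [mecCut_cons, ih]

theorem cutRev_length (arr : List Int) : ∀ sizes L, (cutRev arr L sizes).length = sizes.length := by
  intro sizes
  induction sizes with
  | nil => intro L; simp [cutRev_nil]
  | cons s rest ih => intro L; simp [cutRev_cons, ih]

-- the fuel argument of mecSizes is irrelevant as long as it is at least rem
theorem mecSizes_irrel : ∀ f1 f2 rem step, rem ≤ f1 → rem ≤ f2 →
    mecSizes f1 rem step = mecSizes f2 rem step := by
  intro f1
  induction f1 with
  | zero =>
      intro f2 rem step h1 _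
      have : rem = 0 := by omega
      subst this
      cases f2 <;> simp [mecSizes]
  | succ f ih =>
      intro f2 rem step h1 h2
      by_cases h : rem > 0
      · have h2n : 1 ≤ 2 ^ step := Nat.one_le_two_pow
        cases f2 with
        | zero => omega
        | succ g =>
            simp only [mecSizes, if_pos h]
            rw [ih g (rem - min (2 ^ step) rem) (step + 1) (by omega) (by omega)]
      · have : rem = 0 := by omega
        subst this
        cases f2 <;> simp [mecSizes]

theorem mecSizes_unfold (fuel rem step : Nat) (h : 0 < rem) (hf : rem ≤ fuel) :
    mecSizes fuel rem step
      = min (2 ^ step) rem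
          :: mecSizes (rem - min (2 ^ step) rem) (rem - min (2 ^ step) rem) (step + 1) := by
  have h2n : 1 ≤ 2 ^ step := Nat.one_le_two_pow
  cases fuel with
  | zero => omega
  | succ f =>
      simp only [mecSizes, if_pos h]
      rw [mecSizes_irrel f (rem - min (2 ^ step) rem) (rem - min (2 ^ step) rem) (step + 1)
        (by omega) (by omega)]

theorem mecSizes_zero (fuel step : Nat) : mecSizes fuel 0 step = [] := by
  cases fuel <;> simp [mecSizes]

theorem mecSizes_sum : ∀ rem step, (mecSizes rem rem step).sum = rem := by
  intro rem
  induction rem using Nat.strong_induction_on with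
  | _ rem ih =>
      intro step
      by_cases h : rem > 0
      · have h2n : 1 ≤ 2 ^ step := Nat.one_le_two_pow
        rw [mecSizes_unfold rem rem step h (le_refl rem), List.sum_cons,
          ih (rem - min (2 ^ step) rem) (by omega) (step + 1)]
        omega
      · have : rem = 0 := by omega
        subst this
        simp [mecSizes_zero]

theorem cutRev_eq (arr : List Int) :
    ∀ sizes L, sizes.sum ≤ L → cutRev arr L sizes = mecCut arr (L - sizes.sum) sizes.reverse := by
  intro sizes
  induction sizes with
  | nil => intro L _; simp [cutRev_nil, mecCut_nil]
  | cons s rest ih =>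
      intro L hs
      simp only [List.sum_cons] at hs ⊢
      rw [cutRev_cons, ih (L - s) (by omega), List.reverse_cons, mecCut_append]
      rw [show L - s - rest.sum = L - (s + rest.sum) by omega]
      rw [show L - (s + rest.sum) + rest.reverse.sum = L - s by simp [List.sum_reverse]; omega]
      rw [mecCut_cons, mecCut_nil]

-- the loop invariant: right = n - L mirrors left = L; each pass strips one size off each end
theorem mecLoop_eq (arr : List Int) :
    ∀ fuel L step (chunks : List (List Int)), 2 * L ≤ arr.length → L < fuel →
      mecLoop fuel arr (arr.length : Int) (L : Int) (((arr.length - L : Nat)) : Int) step chunks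
        = cutRev arr L (mecSizes L L step) ++ chunks
            ++ mecCut arr (arr.length - L) (mecSizes L L step) := by
  intro fuel
  induction fuel with
  | zero => intro L step chunks _ h; omega
  | succ fuel ih =>
      intro L step chunks hL hf
      by_cases h0 : L > 0
      · have h2n : 1 ≤ 2 ^ step := Nat.one_le_two_pow
        have h2i : ((2 : Int) ^ step) = ((2 ^ step : Nat) : Int) := by push_cast; ring
        set s : Nat := min (2 ^ step) L with hs
        have hsL : s ≤ L := by omega
        have hspos : 0 < s := by omega
        have hcond : (0 : Int) < (L : Int) ∨ ((arr.length - L : Nat) : Int) < (arr.length : Int) := by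
          left; exact_mod_cast h0
        rw [mecLoop, mecSizes_unfold L L step h0 (le_refl L), if_pos hcond]
        have hls : max 0 ((L : Int) - 2 ^ step) = ((L - s : Nat) : Int) := by
          rw [h2i]; omega
        have hre : min (arr.length : Int) (((arr.length - L : Nat) : Int) + 2 ^ step)
            = ((arr.length - (L - s) : Nat) : Int) := by
          rw [h2i]; omega
        have hlc : PySem.List.slice arr (some (((L - s : Nat)) : Int)) (some (L : Int))
            = (arr.drop (L - s)).take s := by
          rw [show (L : Int) = ((L : Nat) : Int) from rfl, PySem.List.slice_natCast]
          congr 1; omega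
        have hrc : PySem.List.slice arr (some (((arr.length - L : Nat)) : Int))
              (some (((arr.length - (L - s) : Nat)) : Int))
            = (arr.drop (arr.length - L)).take s := by
          rw [PySem.List.slice_natCast]
          congr 1; omega
        have hlcne : (arr.drop (L - s)).take s ≠ [] := by
          have hlen : ((arr.drop (L - s)).take s).length = min s (arr.length - (L - s)) := by
            simp [List.length_take, List.length_drop]
          intro hnil
          rw [hnil] at hlen
          simp only [List.length_nil] at hlen
          omega
        have hrcne : (arr.drop (arr.length - L)).take s ≠ [] := by
          have hlen : ((arr.drop (arr.length - L)).take s).length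
              = min s (arr.length - (arr.length - L)) := by
            simp [List.length_take, List.length_drop]
          intro hnil
          rw [hnil] at hlen
          simp only [List.length_nil] at hlen
          omega
        simp only [hls, hre, hlc, hrc, ne_eq, hlcne, hrcne, not_false_eq_true, if_true,
          List.cons_append]
        have hrec := ih (L - s) (step + 1)
          ((arr.drop (L - s)).take s :: (chunks ++ [(arr.drop (arr.length - L)).take s]))
          (by omega) (by omega)
        rw [hrec, cutRev_cons, mecCut_cons]
        rw [show arr.length - L + s = arr.length - (L - s) by omega]
        simp [← hs]
      · have hL0 : L = 0 := by omega
        subst hL0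
        have hcond : ¬ ((0 : Int) < ((0 : Nat) : Int)
            ∨ ((arr.length - 0 : Nat) : Int) < (arr.length : Int)) := by
          simp
        rw [mecLoop, if_neg hcond, mecSizes_zero]
        simp [cutRev_nil, mecCut_nil]

-- take/drop at the midpoint of two equal-length halves
theorem take_drop_halves (X Y : List (List Int)) (h : X.length = Y.length) :
    (X ++ Y).take ((X ++ Y).length / 2) = X ∧ (X ++ Y).drop ((X ++ Y).length / 2) = Y := by
  have hlen : (X ++ Y).length / 2 = X.length := by
    simp only [List.length_append, h]
    omega
  rw [hlen]
  exact ⟨List.take_left, List.drop_left⟩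

-- ===== VERDICT (by name: the statement is the Claim_ definition above) =====
theorem mirrored_exponential_chunks_spec : Claim_equal_mirrored_exponential_chunks := by
  intro arr _
  unfold Spec_mirrored_exponential_chunks mirrored_exponential_chunks mirrored_exponential_chunks_alt
  dsimp only []
  have hdiv : PySem.Int.floordiv (arr.length : Int) 2 = ((arr.length / 2 : Nat) : Int) := by
    exact_mod_cast PySem.Int.floordiv_natCast arr.length 2
  have hsum : (mecSizes (arr.length / 2) (arr.length / 2) 1).sum = arr.length / 2 :=
    mecSizes_sum _ 1
  have hXY := mecLoop_eq arr (arr.length + 1) (arr.length / 2) 1 [] (by omega) (by omega)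
  have hcutrev : cutRev arr (arr.length / 2) (mecSizes (arr.length / 2) (arr.length / 2) 1)
      = mecCut arr 0 (mecSizes (arr.length / 2) (arr.length / 2) 1).reverse := by
    rw [cutRev_eq arr _ _ (by omega), hsum]
    simp
  have hlenX : (cutRev arr (arr.length / 2) (mecSizes (arr.length / 2) (arr.length / 2) 1)).length
      = (mecCut arr (arr.length - arr.length / 2)
          (mecSizes (arr.length / 2) (arr.length / 2) 1)).length := by
    rw [cutRev_length, mecCut_length]
  obtain ⟨ht, hd⟩ := take_drop_halves _ _ hlenX
  by_cases hpar : arr.length % 2 = 1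
  · -- odd length
    have hmod : PySem.Int.mod (arr.length : Int) 2 = 1 := by
      have h := PySem.Int.mod_natCast arr.length 2
      rw [hpar] at h
      exact_mod_cast h
    rw [if_pos hmod, hdiv]
    rw [show ((arr.length / 2 : Nat) : Int) + 1 = ((arr.length - arr.length / 2 : Nat) : Int) by omega]
    rw [hXY]
    simp only [List.append_nil] at ht hd ⊢
    rw [ht, hd, if_pos hpar]
    rw [mecCut_append, mecCut_append]
    simp only [List.sum_append, List.sum_reverse, hsum, List.sum_cons, List.sum_nil,
      Nat.zero_add, Nat.add_zero]
    rw [hcutrev]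
    have hmid : mecCut arr (arr.length / 2) [1] = [[arr[arr.length / 2]'(by omega)]] := by
      rw [mecCut_cons, mecCut_nil,
        List.drop_eq_getElem_cons (by omega : arr.length / 2 < arr.length),
        List.take_succ_cons, List.take_zero]
    rw [hmid]
    have hget : (PySem.List.pyGet? arr ((arr.length / 2 : Nat) : Int)).getD 0
        = arr[arr.length / 2]'(by omega) := by
      rw [PySem.List.pyGet?_natCast, List.getElem?_eq_getElem (by omega)]
      rfl
    rw [hget]
    rw [show arr.length / 2 + 1 = arr.length - arr.length / 2 by omega]
  · -- even length
    have hmod : ¬ PySem.Int.mod (arr.length : Int) 2 = 1 := by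
      have h : PySem.Int.mod (arr.length : Int) 2 = ((arr.length % 2 : Nat) : Int) := by
        exact_mod_cast PySem.Int.mod_natCast arr.length 2
      rw [h]
      intro hc
      exact hpar (by exact_mod_cast hc)
    rw [if_neg hmod, hdiv]
    rw [show ((arr.length - arr.length / 2 : Nat) : Int) = ((arr.length / 2 : Nat) : Int) by omega] at hXY
    rw [hXY]
    simp only [List.append_nil] at ht hd ⊢
    rw [ht, hd, if_neg hpar]
    rw [mecCut_append]
    simp only [List.append_nil, List.sum_reverse, hsum, Nat.zero_add]
    rw [hcutrev]
    rw [show arr.length - arr.length / 2 = arr.length / 2 by omega]
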